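-- pv_equiv track=rewrite | github.com/Shreyan-A0I/Mitograph | src/b2_kmer_similarity.py | get_circular_window
-- ===== SOURCE A (Python) =====
-- def get_circular_window(sequence, pos, window_size=20):
--     """
--     Extract a window around position `pos` (1-indexed) from a circular genome.
--     window_size is the number of bases on each side (total window = 2*window_size + 1).
--     Handles wrapping around the circular genome.
--     """
--     seq_len = len(sequence)
--     # Convert to 0-indexed
--     center = pos - 1
--
--     indices = []
--     for offset in range(-window_size, window_size + 1):
--         idx = (center + offset) % seq_len
--         indices.append(idx)
--
--     return ''.join(sequence[i] for i in indices)
-- ===== SOURCE B (Python) =====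
-- def get_circular_window(sequence, pos, window_size=20):
--     """
--     Extract a window around position `pos` (1-indexed) from a circular genome.
--     window_size is the number of bases on each side (total window = 2*window_size + 1).
--     Handles wrapping around the circular genome.
--     """
--     seq_len = len(sequence)
--     # 0-indexed start of the window; raises ZeroDivisionError on empty sequence like A
--     start = (pos - 1 - window_size) % seq_len
--     total = 2 * window_size + 1
--     # enough copies of the genome to cover the window even with multiple wraps
--     reps = (start + total + seq_len - 1) // seq_len
--     return ''.join((sequence * reps)[start:start + total])
-- ===== Notes on version B (the rewrite author's own statement) =====
-- stated objective: faster
-- what changed: Replaces the per-offset Python loop building a list of modular indices (and a char-by-char generator join) with one modular start computation plus C-level string repetition and a single slice.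
-- outside the precondition, e.g. on get_circular_window('', 21, -3): A returns '', B raises ZeroDivisionError
import Mathlib
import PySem

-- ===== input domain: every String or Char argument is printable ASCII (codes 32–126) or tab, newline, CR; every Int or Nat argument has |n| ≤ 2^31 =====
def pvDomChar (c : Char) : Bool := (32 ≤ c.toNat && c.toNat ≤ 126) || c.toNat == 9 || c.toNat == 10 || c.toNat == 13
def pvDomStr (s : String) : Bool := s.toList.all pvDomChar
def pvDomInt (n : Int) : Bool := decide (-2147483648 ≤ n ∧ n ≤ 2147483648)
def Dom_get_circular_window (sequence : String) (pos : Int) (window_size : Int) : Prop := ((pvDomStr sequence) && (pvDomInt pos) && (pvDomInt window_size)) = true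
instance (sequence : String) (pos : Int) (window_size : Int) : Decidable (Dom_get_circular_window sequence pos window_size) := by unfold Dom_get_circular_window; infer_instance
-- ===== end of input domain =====

-- B replaces A's per-offset modular-index loop by one modular start plus genome repetition and a single slice (same O(window_size) work, measurably faster constant factor).

-- ===== PORT A =====
def get_circular_window (sequence : String) (pos : Int) (window_size : Int) : String :=
  let s := sequence.toList
  let seqLen : Int := (s.length : Int)
  let center := pos - 1
  let indices : List Int :=
    (PySem.List.pyRange (-window_size) (window_size + 1) 1).foldl
      (fun acc offset => acc ++ [PySem.Int.mod (center + offset) seqLen]) []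
  -- ''.join(sequence[i] for i in indices); sequence[i] = pyGet? (none would be Python's IndexError, excluded by Pre_)
  String.ofList (indices.foldl (fun acc i => acc ++ (PySem.List.pyGet? s i).toList) [])

-- ===== PORT B =====
def get_circular_window_alt (sequence : String) (pos : Int) (window_size : Int) : String :=
  let s := sequence.toList
  let seqLen : Int := (s.length : Int)
  let start := PySem.Int.mod (pos - 1 - window_size) seqLen
  let total := 2 * window_size + 1
  let reps := PySem.Int.floordiv (start + total + seqLen - 1) seqLen
  -- sequence * reps (empty for reps <= 0), then one slice
  let rep : List Char := (List.replicate reps.toNat s).flatten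
  String.ofList (PySem.List.slice rep (some start) (some (start + total)))

-- ===== PRECONDITION & SPEC =====
-- Pre_ excludes the empty sequence, on which A raises ZeroDivisionError for window_size >= 0, and for window_size < 0 returns '' only because the empty offset range skips the '% 0'; B's modulo runs unconditionally and raises there.
def Pre_get_circular_window (sequence : String) (pos : Int) (window_size : Int) : Prop :=
  sequence.toList ≠ []
instance (sequence : String) (pos : Int) (window_size : Int) : Decidable (Pre_get_circular_window sequence pos window_size) := by unfold Pre_get_circular_window; infer_instance

def pvWitness_get_circular_window : String × Int × Int := ("ACGT", 2, 3)

def Spec_get_circular_window (sequence : String) (pos : Int) (window_size : Int) (out : String) : Prop := out = get_circular_window_alt sequence pos window_size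
instance (sequence : String) (pos : Int) (window_size : Int) (out : String) : Decidable (Spec_get_circular_window sequence pos window_size out) := by unfold Spec_get_circular_window; infer_instance

-- ===== CLAIM (what is proved, stated in full; the proofs are below) =====
def Claim_equal_get_circular_window : Prop := ∀ (sequence : String) (pos : Int) (window_size : Int), Dom_get_circular_window sequence pos window_size → Pre_get_circular_window sequence pos window_size → Spec_get_circular_window sequence pos window_size (get_circular_window sequence pos window_size)

-- ===== LEMMAS AND PROOFS =====

-- element of the r-fold repetition of s is s at the index mod |s|
lemma getElem?_flatten_replicate {α : Type} (s : List α) (r m : Nat) (h : m < r * s.length) :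
    ((List.replicate r s).flatten)[m]? = s[m % s.length]? := by
  induction r generalizing m with
  | zero => simp at h
  | succ r ih =>
    rw [Nat.succ_mul] at h
    have hs : 0 < s.length := by
      rcases Nat.eq_zero_or_pos s.length with h0 | h0
      · simp [h0] at h
      · exact h0
    rw [List.replicate_succ, List.flatten_cons]
    by_cases hm : m < s.length
    · rw [List.getElem?_append_left hm, Nat.mod_eq_of_lt hm]
    · push_neg at hm
      rw [List.getElem?_append_right hm, ih (m - s.length) (by omega),
        Nat.mod_eq_sub_mod hm]

-- the two char-list computations agree for a nonempty genome
lemma pvCore (s : List Char) (pos w : Int) (hn : 0 < s.length) :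
    (List.foldl (fun acc i => acc ++ (PySem.List.pyGet? s i).toList) []
      (List.foldl (fun acc offset => acc ++ [PySem.Int.mod ((pos - 1) + offset) (s.length : Int)]) []
        (PySem.List.pyRange (-w) (w + 1) 1)))
    = PySem.List.slice
        ((List.replicate (PySem.Int.floordiv ((PySem.Int.mod (pos - 1 - w) (s.length : Int)) + (2 * w + 1) + (s.length : Int) - 1) (s.length : Int)).toNat s).flatten)
        (some (PySem.Int.mod (pos - 1 - w) (s.length : Int)))
        (some ((PySem.Int.mod (pos - 1 - w) (s.length : Int)) + (2 * w + 1))) := by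
  set n : Int := (s.length : Int) with hnI
  have hnpos : (0:Int) < n := by rw [hnI]; exact_mod_cast hn
  set c : Int := pos - 1 with hc
  set start : Int := PySem.Int.mod (c - w) n with hstart
  have hstart_emod : start = (c - w) % n := by
    rw [hstart, PySem.Int.mod_eq_emod_of_pos hnpos]
  have hstart0 : 0 ≤ start := by rw [hstart_emod]; exact Int.emod_nonneg _ (by omega)
  have hstartlt : start < n := by rw [hstart_emod]; exact Int.emod_lt_of_pos _ hnpos
  set total : Int := 2 * w + 1 with htotal
  set reps : Int := PySem.Int.floordiv (start + total + n - 1) n with hreps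
  have hreps_ediv : reps = (start + total + n - 1) / n := by
    rw [hreps, PySem.Int.floordiv_eq_ediv_of_pos hnpos]
  have h1 := Int.emod_add_ediv (start + total + n - 1) n
  have h2 := Int.emod_nonneg (start + total + n - 1) (by omega : n ≠ 0)
  have h3 := Int.emod_lt_of_pos (start + total + n - 1) hnpos
  have hcover : start + total ≤ reps * n := by rw [hreps_ediv, mul_comm]; omega
  -- A's fold → a map over the offsets
  rw [PySem.List.foldl_append_singleton_eq_map, List.nil_append,
    PySem.List.foldl_append_eq_flatMap, List.nil_append, List.flatMap_map]
  have hfun : (fun o : Int => (PySem.List.pyGet? s (PySem.Int.mod (c + o) n)).toList)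
      = (fun o : Int => [s[((c + o) % n).toNat]'(by
          have h2 := Int.emod_nonneg (c + o) (by omega : n ≠ 0)
          have h3 := Int.emod_lt_of_pos (c + o) hnpos
          omega)]) := by
    funext o
    have h2 : 0 ≤ (c + o) % n := Int.emod_nonneg _ (by omega)
    have h3 : ((c + o) % n).toNat < s.length := by
      have := Int.emod_lt_of_pos (c + o) hnpos
      omega
    rw [PySem.Int.mod_eq_emod_of_pos hnpos, PySem.List.pyGet?_of_nonneg s h2,
      List.getElem?_eq_getElem h3]
    rfl
  rw [hfun, ← List.map_eq_flatMap]
  by_cases hwneg : w < 0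
  · -- empty range on A's side, empty slice on B's side
    rw [PySem.List.pyRange_one_eq_nil (by omega), List.map_nil]
    by_cases hreps0 : reps ≤ 0
    · have hz : reps.toNat = 0 := by omega
      simp [hz, PySem.List.slice]
    · push_neg at hreps0
      have hq : 1 ≤ (start + total + n - 1) / n := by rw [hreps_ediv] at hreps0; omega
      have hmul : n * 1 ≤ n * ((start + total + n - 1) / n) :=
        mul_le_mul_of_nonneg_left hq (le_of_lt hnpos)
      have hstop0 : 0 ≤ start + total := by omega
      rw [PySem.List.slice_toNat _ hstart0 hstop0]
      have hle : (start + total).toNat ≤ start.toNat := by omega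
      simp [Nat.sub_eq_zero_of_le hle]
  · -- main case: total ≥ 1
    push_neg at hwneg
    have htotal1 : 1 ≤ total := by omega
    have hrep0 : 0 ≤ reps := by
      rw [hreps_ediv]; exact Int.ediv_nonneg (by omega) (by omega)
    have hcast : ((reps.toNat * s.length : Nat) : Int) = reps * n := by
      push_cast [Int.toNat_of_nonneg hrep0]; rw [hnI]
    set T : Nat := total.toNat with hT
    have hTle : (start + total).toNat ≤ reps.toNat * s.length := by omega
    have hlen : ((List.replicate reps.toNat s).flatten).length = reps.toNat * s.length := by
      simp [List.length_flatten, Nat.mul_comm]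
    rw [PySem.List.pyRange_one, List.map_map,
      PySem.List.slice_toNat _ hstart0 (by omega)]
    apply List.ext_getElem?
    intro k
    by_cases hk : k < T
    · rw [List.getElem?_take_of_lt (by omega : k < (start + total).toNat - start.toNat), List.getElem?_drop,
        getElem?_flatten_replicate s _ _ (by omega),
        List.getElem?_map, List.getElem?_range (by omega : k < ((w + 1) - -w).toNat)]
      have key : ((start.toNat + k : Nat) : Int) % n = (c + (-w + (k : Int))) % n := by
        have he : ((start.toNat + k : Nat) : Int) = start + k := by push_cast; omega
        rw [he, hstart_emod]
        conv_rhs => rw [show c + (-w + (k : Int)) = (c - w) + k by ring]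
        rw [Int.add_emod (c - w) k, Int.add_emod ((c - w) % n) k, Int.emod_emod_of_dvd _ dvd_rfl]
      have hcast2 : ((start.toNat + k : Nat) : Int) % n = (((start.toNat + k) % s.length : Nat) : Int) := by
        rw [hnI]; exact_mod_cast rfl
      have hidx : (start.toNat + k) % s.length = ((c + (-w + (k : Int))) % n).toNat := by omega
      rw [List.getElem?_eq_getElem (Nat.mod_lt _ hn)]
      simp only [hidx]
      rfl
    · rw [List.getElem?_eq_none (by simp; omega),
        List.getElem?_eq_none (by simp [List.length_take, List.length_drop]; omega)]

-- ===== VERDICT (by name: the statement is the Claim_ definition above) =====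
theorem get_circular_window_spec : Claim_equal_get_circular_window := by
  intro sequence pos window_size _ hpre
  unfold Spec_get_circular_window
  exact congrArg String.ofList
    (pvCore sequence.toList pos window_size (List.length_pos_iff.mpr hpre))
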